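-- pv_equiv track=rewrite | github.com/eWarzywo/informatyka | MinRec.py | MinRec
-- ===== SOURCE A (Python) =====
-- def MinRec(T,k,l):
--     if k == l:
--         return T[k]
--     else:
--         x = MinRec(T,k,((k+l)//2))
--         y = MinRec(T,((k+l)//2)+1,l)
--         if x < y:
--             return x
--         else:
--             return y
-- ===== SOURCE B (Python) =====
-- def MinRec(T, k, l):
--     return min(T[i] for i in range(k, l + 1))
-- ===== Notes on version B (the rewrite author's own statement) =====
-- stated objective: simpler
-- what changed: Replaces the divide-and-conquer binary recursion with a single min() over the indexed segment T[k..l].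
import Mathlib
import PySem

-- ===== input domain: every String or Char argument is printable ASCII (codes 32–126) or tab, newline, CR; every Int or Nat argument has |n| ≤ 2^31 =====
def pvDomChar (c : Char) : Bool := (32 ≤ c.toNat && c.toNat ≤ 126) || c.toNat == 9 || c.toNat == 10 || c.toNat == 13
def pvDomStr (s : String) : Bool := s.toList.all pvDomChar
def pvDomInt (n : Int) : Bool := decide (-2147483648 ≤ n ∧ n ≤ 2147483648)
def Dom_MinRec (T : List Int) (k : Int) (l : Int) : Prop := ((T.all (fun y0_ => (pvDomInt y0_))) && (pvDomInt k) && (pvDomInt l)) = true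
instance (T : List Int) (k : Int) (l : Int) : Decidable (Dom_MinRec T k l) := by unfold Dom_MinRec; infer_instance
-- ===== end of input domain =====

-- B replaces A's binary recursion with a single min() over the indexed segment (same values; simpler).

-- ===== PORT A =====
-- fuel = (l-k).toNat + 1 is a pure totality guard: under Pre_ the recursion depth never exhausts it.
def MinRecGo (T : List Int) (fuel : Nat) (k : Int) (l : Int) : Int :=
  match fuel with
  | 0 => 0
  | fuel + 1 =>
    if k = l then (PySem.List.pyGet? T k).getD 0
    else
      let x := MinRecGo T fuel k (PySem.Int.floordiv (k + l) 2)
      let y := MinRecGo T fuel (PySem.Int.floordiv (k + l) 2 + 1) l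
      if x < y then x else y

def MinRec (T : List Int) (k : Int) (l : Int) : Int :=
  MinRecGo T ((l - k).toNat + 1) k l

-- ===== PORT B =====
-- min(T[i] for i in range(k, l+1)); min() of an empty sequence raises (outside Pre_), hence getD 0.
def MinRec_alt (T : List Int) (k : Int) (l : Int) : Int :=
  (PySem.List.min?
    ((PySem.List.pyRange k (l + 1) 1).map (fun i => (PySem.List.pyGet? T i).getD 0))
    (fun x => x)).getD 0

-- ===== PRECONDITION & SPEC =====
-- Pre_ is exactly where Python A returns: k ≤ l (else infinite recursion) and every index of the
-- segment [k, l] valid under Python indexing (else IndexError at a base case).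
def Pre_MinRec (T : List Int) (k : Int) (l : Int) : Prop :=
  k ≤ l ∧ -(T.length : Int) ≤ k ∧ l < (T.length : Int)
instance (T : List Int) (k : Int) (l : Int) : Decidable (Pre_MinRec T k l) := by
  unfold Pre_MinRec; infer_instance
def pvWitness_MinRec : List Int × Int × Int := ([3, 1, 2], 0, 2)

def Spec_MinRec (T : List Int) (k : Int) (l : Int) (out : Int) : Prop := out = MinRec_alt T k l
instance (T : List Int) (k : Int) (l : Int) (out : Int) : Decidable (Spec_MinRec T k l out) := by
  unfold Spec_MinRec; infer_instance

-- ===== CLAIM (what is proved, stated in full; the proofs are below) =====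
def Claim_equal_MinRec : Prop := ∀ (T : List Int) (k : Int) (l : Int),
  Dom_MinRec T k l → Pre_MinRec T k l → Spec_MinRec T k l (MinRec T k l)

-- ===== LEMMAS AND PROOFS =====
-- g T i abbreviates the element fetch both ports perform.
def pvG (T : List Int) (i : Int) : Int := (PySem.List.pyGet? T i).getD 0

-- the common running-minimum fold over the segment's indices
def pvF (T : List Int) (k l : Int) : Int :=
  (PySem.List.pyRange (k + 1) (l + 1) 1).foldl (fun m i => min m (pvG T i)) (pvG T k)

lemma pv_if_min (x m : Int) : (if x < m then x else m) = min m x := by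
  rw [Int.min_def]; split_ifs <;> omega

lemma pvAlt_eq_F (T : List Int) (k l : Int) (h : k ≤ l) : MinRec_alt T k l = pvF T k l := by
  unfold MinRec_alt pvF
  rw [PySem.List.pyRange_one_cons (by omega : k < l + 1)]
  simp only [List.map_cons, PySem.List.min?_id_cons, Option.getD_some, List.foldl_map]
  rfl

lemma pv_foldl_min_hoist (T : List Int) (L : List Int) (a b : Int) :
    L.foldl (fun m i => min m (pvG T i)) (min a b) =
      min a (L.foldl (fun m i => min m (pvG T i)) b) := by
  induction L generalizing b with
  | nil => rfl
  | cons x xs ih =>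
    simp only [List.foldl_cons]
    rw [min_assoc, ih]

lemma pvF_split (T : List Int) (k m l : Int) (h1 : k ≤ m) (h2 : m < l) :
    pvF T k l = min (pvF T k m) (pvF T (m + 1) l) := by
  unfold pvF
  rw [PySem.List.pyRange_one_append (k + 1) (m + 1) (l + 1) (by omega) (by omega),
    List.foldl_append,
    PySem.List.pyRange_one_cons (by omega : m + 1 < l + 1)]
  simp only [List.foldl_cons]
  rw [pv_foldl_min_hoist]

lemma pvGo_eq_F (T : List Int) (fuel : Nat) (k l : Int)
    (hkl : k ≤ l) (hfuel : (l - k).toNat < fuel) :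
    MinRecGo T fuel k l = pvF T k l := by
  induction fuel generalizing k l with
  | zero => omega
  | succ n ih =>
    unfold MinRecGo
    by_cases h : k = l
    · subst h
      unfold pvF
      rw [PySem.List.pyRange_one_eq_nil (by omega), if_pos rfl]
      simp [pvG]
    · have hlt : k < l := lt_of_le_of_ne hkl h
      set m := PySem.Int.floordiv (k + l) 2 with hm
      have hml : m < l := by
        have h2 : m * 2 ≤ k + l := by
          have := PySem.Int.floordiv_mul_add_mod (k + l) 2
          have hnn : 0 ≤ PySem.Int.mod (k + l) 2 := by
            have := PySem.Int.mod_nonneg (a := k + l) (b := 2) (by omega)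
            omega
          omega
        omega
      have hkm : k ≤ m := by
        have h2 : k + l < (m + 1) * 2 := by
          have := PySem.Int.floordiv_mul_add_mod (k + l) 2
          have hlt2 : PySem.Int.mod (k + l) 2 < 2 :=
            PySem.Int.mod_lt (a := k + l) (b := 2) (by omega)
          omega
        omega
      have hf1 : (m - k).toNat < n := by omega
      have hf2 : (l - (m + 1)).toNat < n := by omega
      simp only [if_neg h]
      rw [ih k m hkm hf1, ih (m + 1) l (by omega) hf2]
      rw [pv_if_min, min_comm]
      exact (pvF_split T k m l hkm hml).symm

-- ===== VERDICT (by name: the statement is the Claim_ definition above) =====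
theorem MinRec_spec : Claim_equal_MinRec := by
  intro T k l _ hpre
  unfold Spec_MinRec
  rw [pvAlt_eq_F T k l hpre.1]
  unfold MinRec
  exact pvGo_eq_F T _ k l hpre.1 (Nat.lt_succ_self _)
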